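-- pv_equiv track=rewrite | github.com/craigargh/cfg-python | interactive_slides/revealmdtojupyter.py | parse_code
-- ===== SOURCE A (Python) =====
-- from collections import namedtuple
-- from itertools import groupby
-- from operator import itemgetter
--
-- Slide = namedtuple('Slide', ['source', 'cell_type', 'slide_type'])
--
-- def parse_code(sub_slide):
--     block_lines = categorise_lines(sub_slide)
--
--     groups = groupby(block_lines, key=itemgetter('block_type'))
--
--     first_key, first_group = next(groups)
--     first_block = [
--         Slide(combine_group(first_group, first_key), first_key, 'subslide')
--     ]
--
--     slide_blocks = [
--         Slide(combine_group(group, key), key, None)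
--         for key, group in groups
--     ]
--
--     return first_block + slide_blocks
--
-- def categorise_lines(sub_slide):
--     lines = sub_slide.split('\n')
--
--     block_lines = []
--     block_type = 'markdown'
--
--     for line in lines:
--         if '``` python' in line or '```python' in line:
--             block_type = 'code'
--             continue
--         elif '```' in line and block_type == 'code':
--             block_type = 'markdown'
--             continue
--         elif line[:5] == 'Note:':
--             continue
--
--         line_data = {'source': f'{line}\n', 'block_type': block_type}
--
--         block_lines.append(line_data)
--
--     return block_lines
--
-- def combine_group(group, block_type):
--     source_lines = [
--         item['source']
--         for item in group
--     ]
--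
--     source = ''.join(source_lines)
--
--     if block_type == 'code':
--         source = source.strip('\n')
--
--     return source
-- ===== SOURCE B (Python) =====
-- from collections import namedtuple
--
-- Slide = namedtuple('Slide', ['source', 'cell_type', 'slide_type'])
--
-- def parse_code(sub_slide):
--     # one streaming pass: group surviving lines into consecutive same-type blocks
--     blocks = []
--     block_type = 'markdown'
--     for line in sub_slide.split('\n'):
--         if '``` python' in line or '```python' in line:
--             block_type = 'code'
--         elif '```' in line and block_type == 'code':
--             block_type = 'markdown'
--         elif not line.startswith('Note:'):
--             if blocks and blocks[-1][0] == block_type: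
--                 blocks[-1][1].append(line)
--             else:
--                 blocks.append((block_type, [line]))
--     slides = [Slide(make_source(lines, t), t, None) for t, lines in blocks]
--     if slides:
--         slides[0] = slides[0]._replace(slide_type='subslide')
--     return slides
--
-- def make_source(lines, block_type):
--     source = '\n'.join(lines) + '\n'
--     if block_type == 'code':
--         source = source.strip('\n')
--     return source
-- ===== Notes on version B (the rewrite author's own statement) =====
-- stated objective: simpler
-- what changed: Replaces the categorise-lines -> itertools.groupby -> combine_group pipeline with a single streaming pass that appends each surviving line to the last block when its type matches (else opens a new block), then renders the slides once, tagging only the first block as a subslide.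
-- crash fix: On input consisting only of skipped lines (python code fences, fence lines while in code state, and note-prefixed lines), A raises StopIteration at next(groups); B returns an empty list. — e.g. on parse_code("Note: skipped"): A raises StopIteration, B returns []
import Mathlib
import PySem

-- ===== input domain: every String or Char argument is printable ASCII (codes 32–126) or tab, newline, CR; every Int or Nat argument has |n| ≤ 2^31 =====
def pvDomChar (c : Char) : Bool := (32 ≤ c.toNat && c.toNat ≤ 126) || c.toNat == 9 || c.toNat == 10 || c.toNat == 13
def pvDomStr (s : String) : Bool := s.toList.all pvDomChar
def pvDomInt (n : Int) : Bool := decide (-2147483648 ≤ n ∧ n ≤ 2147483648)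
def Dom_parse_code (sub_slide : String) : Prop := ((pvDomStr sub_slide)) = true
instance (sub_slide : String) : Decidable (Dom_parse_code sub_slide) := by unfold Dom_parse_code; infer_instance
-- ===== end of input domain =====

-- B replaces A's categorise-lines -> itertools.groupby -> combine pipeline by one streaming
-- pass that appends each surviving line to the last block (or opens a new one); objective: simpler.

-- fence tests, textually identical in both Pythons ('``` python' in line or '```python' in line; '```' in line)
def pvPyFence (l : String) : Bool := PySem.Str.isIn "``` python" l || PySem.Str.isIn "```python" l
def pvTicks (l : String) : Bool := PySem.Str.isIn "```" l

-- ===== PORT A =====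
-- categorise_lines: the for-loop with its growing block_lines accumulator
def pvCatLoop : List String → String → List (String × String) → List (String × String)
  | [], _, acc => acc
  | l :: ls, bt, acc =>
    if pvPyFence l then pvCatLoop ls "code" acc
    else if pvTicks l && bt == "code" then pvCatLoop ls "markdown" acc
    else if PySem.Str.slice l none (some 5) == "Note:" then pvCatLoop ls bt acc
    else pvCatLoop ls bt (acc ++ [(l ++ "\n", bt)])

-- itertools.groupby(block_lines, key=block_type): maximal runs of equal key, as (key, sources)
def pvConsRun (s k : String) : List (String × List String) → List (String × List String)
  | [] => [(k, [s])]
  | (k', g) :: gs => if k == k' then (k, s :: g) :: gs else (k, [s]) :: (k', g) :: gs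

def pvGroupby : List (String × String) → List (String × List String)
  | [] => []
  | (s, k) :: rest => pvConsRun s k (pvGroupby rest)

-- combine_group
def pvCombine (g : List String) (bt : String) : String :=
  let source := PySem.Str.join "" g
  if bt == "code" then PySem.Str.stripChars source "\n" else source

def parse_code (sub_slide : String) : List (String × String × Option String) :=
  let block_lines := pvCatLoop ((PySem.Str.split? sub_slide "\n").getD []) "markdown" []
  match pvGroupby block_lines with
  | [] => []   -- Python raises StopIteration at next(groups) here; excluded by Pre_
  | (k, g) :: rest =>
      (pvCombine g k, k, some "subslide") :: rest.map (fun p => (pvCombine p.2 p.1, p.1, none))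

-- ===== PORT B =====
-- append the line to the last block when its type matches, else open a new block
def pvAppendLine (blocks : List (String × List String)) (bt l : String) : List (String × List String) :=
  match blocks.getLast? with
  | some (k, g) => if k == bt then blocks.dropLast ++ [(k, g ++ [l])] else blocks ++ [(bt, [l])]
  | none => blocks ++ [(bt, [l])]

def pvLoopB : List String → String → List (String × List String) → List (String × List String)
  | [], _, blocks => blocks
  | l :: ls, bt, blocks =>
    if pvPyFence l then pvLoopB ls "code" blocks
    else if pvTicks l && bt == "code" then pvLoopB ls "markdown" blocks
    else if !(PySem.Str.startswith l "Note:") then pvLoopB ls bt (pvAppendLine blocks bt l)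
    else pvLoopB ls bt blocks

def pvMakeSource (g : List String) (bt : String) : String :=
  let source := PySem.Str.join "\n" g ++ "\n"
  if bt == "code" then PySem.Str.stripChars source "\n" else source

def parse_code_alt (sub_slide : String) : List (String × String × Option String) :=
  let blocks := pvLoopB ((PySem.Str.split? sub_slide "\n").getD []) "markdown" []
  let slides := blocks.map (fun p => (pvMakeSource p.2 p.1, p.1, (none : Option String)))
  match slides with
  | [] => []
  | s :: rest => (s.1, s.2.1, some "subslide") :: rest

-- ===== PRECONDITION & SPEC =====
-- the block_type in force before a line: 'code' iff the last preceding '```'-line was a python fence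
def pvCodeState (pre : List String) : Bool :=
  match (pre.filter pvTicks).getLast? with
  | some l => pvPyFence l
  | none => false

-- a line survives the skipping rules of categorise_lines
def pvKeeps (pre : List String) (l : String) : Bool :=
  !pvPyFence l && !(pvTicks l && pvCodeState pre) && !PySem.Str.startswith l "Note:"

-- Pre_ excludes exactly the inputs whose every line is skipped: there Python A raises StopIteration at next(groups).
def Pre_parse_code (sub_slide : String) : Prop :=
  let lines := (PySem.Str.split? sub_slide "\n").getD []
  ∃ i : Nat, i < lines.length ∧ pvKeeps (lines.take i) (lines.getD i "") = true

instance (sub_slide : String) : Decidable (Pre_parse_code sub_slide) := by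
  unfold Pre_parse_code; infer_instance

def pvWitness_parse_code : String := "hello"

-- On input whose every line is skipped (only fence lines, '```'-lines while in code state, and 'Note:' lines),
-- A raises StopIteration from next(groups); B returns [].
def Raises_parse_code (sub_slide : String) : Prop :=
  let lines := (PySem.Str.split? sub_slide "\n").getD []
  ∀ i : Nat, i < lines.length → pvKeeps (lines.take i) (lines.getD i "") = false

instance (sub_slide : String) : Decidable (Raises_parse_code sub_slide) := by
  unfold Raises_parse_code; infer_instance

def pvRaiseWitness_parse_code : String := "Note: skipped"
def pvRaiseWitnessOut_parse_code : List (String × String × Option String) := []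

def Spec_parse_code (sub_slide : String) (out : List (String × String × Option String)) : Prop := out = parse_code_alt sub_slide
instance (sub_slide : String) (out : List (String × String × Option String)) : Decidable (Spec_parse_code sub_slide out) := by unfold Spec_parse_code; infer_instance

-- ===== CLAIM (what is proved, stated in full; the proofs are below) =====
def Claim_equal_parse_code : Prop := ∀ (sub_slide : String), Dom_parse_code sub_slide → Pre_parse_code sub_slide → Spec_parse_code sub_slide (parse_code sub_slide)

def Claim_raises_parse_code : Prop := (∀ (sub_slide : String), Dom_parse_code sub_slide → Raises_parse_code sub_slide → ¬ Pre_parse_code sub_slide) ∧ (Dom_parse_code (pvRaiseWitness_parse_code) ∧ Raises_parse_code (pvRaiseWitness_parse_code) ∧ parse_code_alt (pvRaiseWitness_parse_code) = pvRaiseWitnessOut_parse_code)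

-- ===== LEMMAS AND PROOFS =====

-- raw categorisation: the surviving lines with their block type, without the '\n' suffix
def pvCatR : List String → String → List (String × String)
  | [], _ => []
  | l :: ls, bt =>
    if pvPyFence l then pvCatR ls "code"
    else if pvTicks l && bt == "code" then pvCatR ls "markdown"
    else if !(PySem.Str.startswith l "Note:") then (l, bt) :: pvCatR ls bt
    else pvCatR ls bt

-- runs of pvCatR, grouped like pvGroupby but on raw lines
def pvRuns : List (String × String) → List (String × List String)
  | [] => []
  | (l, k) :: rest => pvConsRun l k (pvRuns rest)

def pvJoinRuns (bs : List (String × List String)) : List (String × List String) → List (String × List String)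
  | [] => bs
  | (k, g) :: rs =>
    match bs.getLast? with
    | some (k', g') => if k' == k then bs.dropLast ++ (k', g' ++ g) :: rs else bs ++ (k, g) :: rs
    | none => bs ++ (k, g) :: rs

-- line[:5] == 'Note:' IS startswith
lemma pvNote_eq (l : String) :
    (PySem.Str.slice l none (some 5) == "Note:") = PySem.Str.startswith l "Note:" := by
  have h1 : (PySem.Str.slice l none (some 5)).toList = l.toList.take 5 := by
    have := PySem.List.slice_to (xs := l.toList) (b := 5) (by norm_num)
    simp [PySem.Str.toList_slice, this]
  have hlen : ("Note:".toList).length = 5 := by decide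
  rw [Bool.eq_iff_iff]
  rw [beq_iff_eq, show PySem.Str.startswith l "Note:" = PySem.Chars.startswith l.toList "Note:".toList from by simp,
    PySem.Chars.startswith_iff, List.prefix_iff_eq_take, hlen]
  constructor
  · intro h
    rw [← h1, h]
  · intro h
    have h2 : (PySem.Str.slice l none (some 5)).toList = "Note:".toList := by rw [h1, ← h]
    exact String.toList_inj.mp h2

lemma pvCatLoop_eq (ls : List String) (bt : String) (acc : List (String × String)) :
    pvCatLoop ls bt acc = acc ++ (pvCatR ls bt).map (fun p => (p.1 ++ "\n", p.2)) := by
  induction ls generalizing bt acc with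
  | nil => simp [pvCatLoop, pvCatR]
  | cons l ls ih =>
    simp only [pvCatLoop, pvCatR, pvNote_eq]
    by_cases h1 : pvPyFence l = true
    · simp [h1, ih]
    · by_cases h2 : (pvTicks l && bt == "code") = true
      · simp [h1, h2, ih]
      · by_cases h3 : PySem.Chars.startswith l.toList ['N','o','t','e',':'] = true
        · simp [h1, h2, h3, ih]
        · simp [h1, h2, h3, ih]

lemma pvLoopB_eq_foldl (ls : List String) (bt : String) (blocks : List (String × List String)) :
    pvLoopB ls bt blocks =
      List.foldl (fun bs p => pvAppendLine bs p.2 p.1) blocks (pvCatR ls bt) := by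
  induction ls generalizing bt blocks with
  | nil => simp [pvLoopB, pvCatR]
  | cons l ls ih =>
    simp only [pvLoopB, pvCatR]
    by_cases h1 : pvPyFence l = true
    · simp [h1, ih]
    · by_cases h2 : (pvTicks l && bt == "code") = true
      · simp [h1, h2, ih]
      · by_cases h3 : PySem.Chars.startswith l.toList ['N','o','t','e',':'] = true
        · simp [h1, h2, h3, ih]
        · simp [h1, h2, h3, ih]

lemma pvJoin_append (bs : List (String × List String)) (k l : String) (rs : List (String × List String)) :
    pvJoinRuns (pvAppendLine bs k l) rs = pvJoinRuns bs (pvConsRun l k rs) := by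
  rcases List.eq_nil_or_concat bs with rfl | ⟨bs', p0, rfl⟩
  · cases rs with
    | nil => simp [pvAppendLine, pvJoinRuns, pvConsRun]
    | cons r rs' =>
      rcases r with ⟨k1, g1⟩
      by_cases h1 : k = k1 <;>
        simp [pvAppendLine, pvJoinRuns, pvConsRun, h1]
  · rcases p0 with ⟨k0, g0⟩
    cases rs with
    | nil =>
      by_cases h0 : k0 = k <;>
        simp [pvAppendLine, pvJoinRuns, pvConsRun, h0]
    | cons r rs' =>
      rcases r with ⟨k1, g1⟩
      by_cases h0 : k0 = k <;> by_cases h1 : k = k1 <;>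
        simp [pvAppendLine, pvJoinRuns, pvConsRun, h0, h1]
      simp_all

lemma pvFoldl_runs (items : List (String × String)) (bs : List (String × List String)) :
    List.foldl (fun bs p => pvAppendLine bs p.2 p.1) bs items = pvJoinRuns bs (pvRuns items) := by
  induction items generalizing bs with
  | nil => simp [pvRuns, pvJoinRuns]
  | cons it its ih =>
    rcases it with ⟨l, k⟩
    simp only [List.foldl_cons, pvRuns]
    rw [ih, pvJoin_append]

lemma pvJoinRuns_nil (rs : List (String × List String)) : pvJoinRuns [] rs = rs := by
  cases rs with
  | nil => rfl
  | cons r rs => rcases r with ⟨k, g⟩; simp [pvJoinRuns]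

lemma pvGroupby_map (items : List (String × String)) :
    pvGroupby (items.map (fun p => (p.1 ++ "\n", p.2))) =
      (pvRuns items).map (fun q => (q.1, q.2.map (fun s => s ++ "\n"))) := by
  induction items with
  | nil => simp [pvGroupby, pvRuns]
  | cons it its ih =>
    rcases it with ⟨l, k⟩
    simp only [List.map_cons, pvGroupby, pvRuns, ih]
    cases h : pvRuns its with
    | nil => simp [pvConsRun]
    | cons r rs =>
      rcases r with ⟨k', g⟩
      by_cases hk : k = k' <;> simp [pvConsRun, hk]

lemma pvRuns_ne_nil (items : List (String × String)) :
    ∀ q ∈ pvRuns items, q.2 ≠ [] := by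
  induction items with
  | nil => simp [pvRuns]
  | cons it its ih =>
    rcases it with ⟨l, k⟩
    simp only [pvRuns]
    intro q hq
    cases h : pvRuns its with
    | nil => rw [h] at hq; simp [pvConsRun] at hq; simp [hq]
    | cons r rs =>
      rcases r with ⟨k', g⟩
      rw [h, pvConsRun] at hq
      split at hq
      · rcases List.mem_cons.mp hq with hq | hq
        · simp [hq]
        · exact ih q (by rw [h]; exact List.mem_cons_of_mem _ hq)
      · rcases List.mem_cons.mp hq with hq | hq
        · simp [hq]
        · exact ih q (by rw [h]; exact hq)

lemma pvJoin_newlines (g : List String) (h : g ≠ []) :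
    PySem.Str.join "" (g.map (fun s => s ++ "\n")) = PySem.Str.join "\n" g ++ "\n" := by
  apply String.toList_inj.mp
  simp only [String.toList_append, PySem.Str.toList_join, List.map_map]
  induction g with
  | nil => exact absurd rfl h
  | cons x t ih =>
    cases t with
    | nil =>
      simp [PySem.Chars.join_singleton, String.toList_append]
    | cons y t' =>
      have hne : y :: t' ≠ [] := by simp
      simp only [List.map_cons, Function.comp] at ih ⊢
      rw [PySem.Chars.join_cons_cons, PySem.Chars.join_cons_cons, ih hne]
      simp [String.toList_append, List.append_assoc]

lemma pvCombine_eq_make (g : List String) (k : String) (h : g ≠ []) :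
    pvCombine (g.map (fun s => s ++ "\n")) k = pvMakeSource g k := by
  simp [pvCombine, pvMakeSource, pvJoin_newlines g h]

-- ===== VERDICT (by name: the statement is the Claim_ definition above) =====
theorem parse_code_spec : Claim_equal_parse_code := by
  intro sub_slide _ _
  unfold Spec_parse_code parse_code parse_code_alt
  simp only [pvCatLoop_eq, pvLoopB_eq_foldl, pvFoldl_runs, pvJoinRuns_nil, List.nil_append,
    pvGroupby_map]
  cases h : pvRuns (pvCatR ((PySem.Str.split? sub_slide "\n").getD []) "markdown") with
  | nil => simp
  | cons r rest =>
    rcases r with ⟨k, g⟩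
    have hg : g ≠ [] :=
      pvRuns_ne_nil _ (k, g) (by rw [h]; exact List.mem_cons_self)
    simp only [List.map_cons, List.map_map]
    rw [pvCombine_eq_make g k hg]
    refine congrArg (_ :: ·) (List.map_congr_left ?_)
    intro p hp
    have hp2 : p.2 ≠ [] :=
      pvRuns_ne_nil _ p (by rw [h]; exact List.mem_cons_of_mem _ hp)
    simp [Function.comp, pvCombine_eq_make p.2 p.1 hp2]

theorem parse_code_raises : Claim_raises_parse_code := by
  unfold Claim_raises_parse_code
  refine ⟨?_, by decide, by decide, by decide⟩
  intro sub_slide _ hr hp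
  rcases hp with ⟨i, hi, hk⟩
  have h2 := hr i hi
  rw [hk] at h2
  exact Bool.noConfusion h2

-- self-check: the recorded crash-fix witness value, read back from parse_code_raises
theorem pvRaiseWitness_parse_code_witness :
    parse_code_alt pvRaiseWitness_parse_code = pvRaiseWitnessOut_parse_code :=
  parse_code_raises.2.2.2
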